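-- pv_equiv track=rewrite | github.com/carlostrub/steganos | steganos/src/branchpoints.py | changeable_part
-- ===== SOURCE A (Python) =====
-- def changeable_part(branchpoint, unchangeable_areas):
--     for start, end in unchangeable_areas:
--         for change in branchpoint:
--             if ((change[0] > start and change[0] < end) or
--                     (change[1] > start and change[1] < end) or
--                     (change[0] < start and change[1] > end)):
--                 branchpoint = [c for c in branchpoint if c != change]
--     return branchpoint
-- ===== SOURCE B (Python) =====
-- def changeable_part(branchpoint, unchangeable_areas):
--     kept = []
--     for c in branchpoint:
--         hit = False
--         for s, e in unchangeable_areas: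
--             if s < c[0] < e or s < c[1] < e or (c[0] < s and c[1] > e):
--                 hit = True
--                 break
--         if not hit:
--             kept.append(c)
--     return kept
-- ===== Notes on version B (the rewrite author's own statement) =====
-- stated objective: alternative
-- what changed: A repeatedly rebuilds the whole list inside nested area/change loops; B makes one pass over the changes, checking each change against the areas with an early-exit scan and appending survivors to an accumulator.
import Mathlib
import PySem

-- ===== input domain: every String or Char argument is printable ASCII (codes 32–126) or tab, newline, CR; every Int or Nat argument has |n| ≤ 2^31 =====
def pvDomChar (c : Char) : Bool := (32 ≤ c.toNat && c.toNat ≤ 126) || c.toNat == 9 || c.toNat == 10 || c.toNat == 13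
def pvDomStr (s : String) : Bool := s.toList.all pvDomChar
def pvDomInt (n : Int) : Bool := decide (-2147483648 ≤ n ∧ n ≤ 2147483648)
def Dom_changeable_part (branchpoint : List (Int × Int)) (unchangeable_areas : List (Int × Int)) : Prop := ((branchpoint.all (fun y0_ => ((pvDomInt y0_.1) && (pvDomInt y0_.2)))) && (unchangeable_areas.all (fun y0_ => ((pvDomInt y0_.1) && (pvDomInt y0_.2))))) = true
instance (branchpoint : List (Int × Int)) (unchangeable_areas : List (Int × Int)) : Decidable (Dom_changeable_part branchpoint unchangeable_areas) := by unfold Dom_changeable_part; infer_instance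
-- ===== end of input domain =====

-- B replaces A's nested loops (which rebuild the whole list once per removed change)
-- by a single accumulator pass over the changes with an early-exit scan of the areas; objective: alternative.


-- ===== PORT A =====
-- A's if-condition on a change (area = (start, end)); tested on the snapshot of
-- branchpoint taken when the inner `for` starts.
def pvCondA (change : Int × Int) (area : Int × Int) : Bool :=
  (change.1 > area.1 && change.1 < area.2) ||
  (change.2 > area.1 && change.2 < area.2) ||
  (change.1 < area.1 && change.2 > area.2)

def changeable_part (branchpoint : List (Int × Int)) (unchangeable_areas : List (Int × Int)) : List (Int × Int) :=
  unchangeable_areas.foldl (fun bp area =>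
    -- Python's inner `for change in branchpoint` iterates the list object bound
    -- at loop entry (bp), while the name is rebound to the filtered copy.
    bp.foldl (fun acc change =>
      if pvCondA change area then acc.filter (fun c => c != change) else acc) bp) branchpoint

-- ===== PORT B =====
-- the inner early-exit scan: `hit` becomes true at the first overlapping area
def pvHit (c : Int × Int) : List (Int × Int) → Bool
  | [] => false
  | (s, e) :: rest =>
    if (s < c.1 && c.1 < e) || (s < c.2 && c.2 < e) || (c.1 < s && c.2 > e) then true
    else pvHit c rest

-- the outer pass: append each non-hit change to the accumulator (built front-to-back)
def pvKeep (bp : List (Int × Int)) (areas : List (Int × Int)) : List (Int × Int) :=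
  match bp with
  | [] => []
  | c :: rest => if pvHit c areas then pvKeep rest areas else c :: pvKeep rest areas

def changeable_part_alt (branchpoint : List (Int × Int)) (unchangeable_areas : List (Int × Int)) : List (Int × Int) :=
  pvKeep branchpoint unchangeable_areas

-- ===== PRECONDITION & SPEC =====
def Spec_changeable_part (branchpoint : List (Int × Int)) (unchangeable_areas : List (Int × Int)) (out : List (Int × Int)) : Prop := out = changeable_part_alt branchpoint unchangeable_areas
instance (branchpoint : List (Int × Int)) (unchangeable_areas : List (Int × Int)) (out : List (Int × Int)) : Decidable (Spec_changeable_part branchpoint unchangeable_areas out) := by unfold Spec_changeable_part; infer_instance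

-- ===== CLAIM (what is proved, stated in full; the proofs are below) =====
def Claim_equal_changeable_part : Prop := ∀ (branchpoint : List (Int × Int)) (unchangeable_areas : List (Int × Int)), Dom_changeable_part branchpoint unchangeable_areas → Spec_changeable_part branchpoint unchangeable_areas (changeable_part branchpoint unchangeable_areas)

-- ===== LEMMAS AND PROOFS =====

-- The inner loop over snapshot l removes from init exactly the elements equal to
-- some change of l satisfying the condition.
theorem pv_inner_fold (area : Int × Int) (l : List (Int × Int)) (init : List (Int × Int)) :
    l.foldl (fun acc change =>
      if pvCondA change area then acc.filter (fun c => c != change) else acc) init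
    = init.filter (fun c => !(l.any (fun ch => pvCondA ch area && (c == ch)))) := by
  induction l generalizing init with
  | nil => simp
  | cons ch t ih =>
    simp only [List.foldl_cons, List.any_cons, ih]
    by_cases h : pvCondA ch area = true
    · simp only [h, if_true, List.filter_filter]
      apply List.filter_congr
      intro c _
      simp [Bool.not_or, Bool.and_comm, bne]
    · simp [h]

-- On elements of l, "some change of l equals c and satisfies the condition" is
-- just "c satisfies the condition".
theorem pv_any_self (area : Int × Int) (l : List (Int × Int)) (c : Int × Int) (hc : c ∈ l) :
    (l.any (fun ch => pvCondA ch area && (c == ch))) = pvCondA c area := by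
  cases h : pvCondA c area with
  | true =>
    simp only [List.any_eq_true]
    exact ⟨c, hc, by simp [h]⟩
  | false =>
    simp only [List.any_eq_false]
    intro ch _
    by_cases hce : c = ch
    · subst hce; simp [h]
    · simp [hce]

-- One pass of A's outer loop is a plain filter by the condition.
theorem pv_step (area : Int × Int) (bp : List (Int × Int)) :
    bp.foldl (fun acc change =>
      if pvCondA change area then acc.filter (fun c => c != change) else acc) bp
    = bp.filter (fun c => !pvCondA c area) := by
  rw [pv_inner_fold]
  apply List.filter_congr
  intro c hc
  rw [pv_any_self area bp c hc]

-- B's early-exit scan decides "some area satisfies A's condition".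
theorem pv_hit_any (c : Int × Int) (areas : List (Int × Int)) :
    pvHit c areas = areas.any (fun a => pvCondA c a) := by
  induction areas with
  | nil => rfl
  | cons a t ih =>
    obtain ⟨s, e⟩ := a
    have hc : ((s < c.1 && c.1 < e) || (s < c.2 && c.2 < e) || (c.1 < s && c.2 > e))
        = pvCondA c (s, e) := rfl
    simp only [pvHit, hc, List.any_cons, ih]
    cases pvCondA c (s, e) <;> simp
-- B's outer pass is a filter by "no area hits".
theorem pv_keep_filter (bp areas : List (Int × Int)) :
    pvKeep bp areas = bp.filter (fun c => !pvHit c areas) := by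
  induction bp with
  | nil => rfl
  | cons c rest ih =>
    simp only [pvKeep, ih, List.filter_cons]
    by_cases h : pvHit c areas <;> simp [h]

-- Folding filters over the areas equals one filter with the disjunction.
theorem pv_outer_fold (areas : List (Int × Int)) (bp : List (Int × Int)) :
    areas.foldl (fun bp a => bp.filter (fun c => !pvCondA c a)) bp
    = bp.filter (fun c => !(areas.any (fun a => pvCondA c a))) := by
  induction areas generalizing bp with
  | nil => simp
  | cons a t ih =>
    simp only [List.foldl_cons, ih, List.filter_filter]
    apply List.filter_congr
    intro c _
    simp [Bool.not_or, Bool.and_comm]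

theorem pv_main (bp areas : List (Int × Int)) :
    changeable_part bp areas = changeable_part_alt bp areas := by
  unfold changeable_part changeable_part_alt
  rw [pv_keep_filter]
  have : ∀ c, (!pvHit c areas) = !(areas.any (fun a => pvCondA c a)) := by
    intro c; rw [pv_hit_any]
  simp only [this, ← pv_outer_fold]
  simp only [pv_step]

-- ===== VERDICT (by name: the statement is the Claim_ definition above) =====
theorem changeable_part_spec : Claim_equal_changeable_part := by
  intro bp areas _
  unfold Spec_changeable_part
  exact pv_main bp areas
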